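-- pv_equiv track=rewrite | github.com/Eclirise/Neflare-Xbot | lib/cn_ssh_geo_update.py | format_elements
-- ===== SOURCE A (Python) =====
-- from typing import Iterable, List
--
-- def format_elements(networks: Iterable[str], indent: str = "        ", wrap: int = 6) -> str:
--     items = list(networks)
--     if not items:
--         return indent
--     lines: List[str] = []
--     for index in range(0, len(items), wrap):
--         chunk = items[index : index + wrap]
--         lines.append(indent + ", ".join(chunk))
--     return ",\n".join(lines)
-- ===== SOURCE B (Python) =====
-- def format_elements(networks, indent="        ", wrap=6):
--     parts = []
--     for index, item in enumerate(networks):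
--         if index == 0:
--             sep = indent
--         elif index % wrap == 0:
--             sep = ",\n" + indent
--         else:
--             sep = ", "
--         parts.append(sep + item)
--     if not parts:
--         return indent
--     return "".join(parts)
-- ===== Notes on version B (the rewrite author's own statement) =====
-- stated objective: simpler
-- what changed: Replaces range-stepped slicing with an inner ', '.join per chunk and an outer ',\n'.join of lines by a single enumerate pass that picks each item's separator (indent / ',\n'+indent / ', ') from the running index and joins the fragments once.
-- outside the precondition, e.g. on format_elements(['a'], ' ', -2): A returns '', B returns ' a'; on format_elements(['a', 'b'], ' ', 0): A raises ValueError, B raises ZeroDivisionError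
import Mathlib
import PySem

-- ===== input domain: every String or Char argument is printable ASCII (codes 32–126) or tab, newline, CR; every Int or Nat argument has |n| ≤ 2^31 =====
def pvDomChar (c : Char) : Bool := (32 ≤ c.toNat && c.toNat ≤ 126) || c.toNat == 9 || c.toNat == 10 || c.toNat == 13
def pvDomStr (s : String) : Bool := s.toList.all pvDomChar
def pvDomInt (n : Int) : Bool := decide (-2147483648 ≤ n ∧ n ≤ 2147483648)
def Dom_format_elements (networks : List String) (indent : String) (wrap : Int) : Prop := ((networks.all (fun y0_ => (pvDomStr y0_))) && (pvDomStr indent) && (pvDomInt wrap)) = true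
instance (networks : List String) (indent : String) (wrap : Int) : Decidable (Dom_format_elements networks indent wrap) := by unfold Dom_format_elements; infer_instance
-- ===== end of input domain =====

-- B replaces A's range-stepped slicing (inner ", ".join per chunk, outer ",\n".join of lines)
-- by a single enumerate pass that picks each item's separator from the running index and joins once.


-- ===== PORT A =====
def format_elements (networks : List String) (indent : String) (wrap : Int) : String :=
  let items := networks
  if items = [] then indent
  else
    let lines : List String :=
      (PySem.List.pyRange 0 (items.length : Int) wrap).foldl
        (fun lines index =>
          lines ++ [indent ++ PySem.Str.join ", " (PySem.List.slice items (some index) (some (index + wrap)))]) []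
    PySem.Str.join ",\n" lines

-- ===== PORT B =====
def format_elements_alt (networks : List String) (indent : String) (wrap : Int) : String :=
  let parts : List String :=
    (PySem.List.enumerate networks 0).foldl
      (fun parts p =>
        parts ++ [(if p.1 == 0 then indent
                   else if PySem.Int.mod p.1 wrap == 0 then ",\n" ++ indent
                   else ", ") ++ p.2]) []
  if parts = [] then indent
  else PySem.Str.join "" parts

-- ===== PRECONDITION & SPEC =====
-- Pre_ excludes nonpositive wrap on nonempty input — outside the natural domain of a chunk size:
-- there A raises ValueError (wrap = 0, range step 0) or silently returns "" discarding all items (wrap < 0).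
def Pre_format_elements (networks : List String) (indent : String) (wrap : Int) : Prop :=
  networks = [] ∨ 0 < wrap
instance (networks : List String) (indent : String) (wrap : Int) : Decidable (Pre_format_elements networks indent wrap) := by unfold Pre_format_elements; infer_instance

def pvWitness_format_elements : List String × String × Int := (["a", "b", "c"], " ", 2)

def Spec_format_elements (networks : List String) (indent : String) (wrap : Int) (out : String) : Prop := out = format_elements_alt networks indent wrap
instance (networks : List String) (indent : String) (wrap : Int) (out : String) : Decidable (Spec_format_elements networks indent wrap out) := by unfold Spec_format_elements; infer_instance

-- ===== CLAIM (what is proved, stated in full; the proofs are below) =====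
def Claim_equal_format_elements : Prop := ∀ (networks : List String) (indent : String) (wrap : Int), Dom_format_elements networks indent wrap → Pre_format_elements networks indent wrap → Spec_format_elements networks indent wrap (format_elements networks indent wrap)

-- ===== LEMMAS AND PROOFS =====

-- the chunks of size wp+1 that A's stepped range carves out (proof-only helper)
def pvChunks (wp : Nat) (items : List String) : List (List String) :=
  if h : items = [] then []
  else items.take (wp + 1) :: pvChunks wp (items.drop (wp + 1))
termination_by items.length
decreasing_by
  simp only [List.length_drop]
  have : items.length ≠ 0 := by simpa [List.length_eq_zero_iff] using h
  omega

-- the common normal form both programs compute: chunk lines joined with ",\n"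
def pvT (ind : String) (wp : Nat) (items : List String) : String :=
  PySem.Str.join ",\n" ((pvChunks wp items).map (fun c => ind ++ PySem.Str.join ", " c))

theorem pv_foldl_push {α β : Type} (l : List α) (init : List β) (g : α → β) :
    l.foldl (fun acc x => acc ++ [g x]) init = init ++ l.map g := by
  induction l generalizing init with
  | nil => simp
  | cons x xs ih => simp [List.foldl_cons, ih]

theorem pv_pyRange_pos_nil (a b s : Int) (hs : 0 < s) (h : b ≤ a) :
    PySem.List.pyRange a b s = [] := by
  rw [PySem.List.pyRange_of_pos a b hs]
  simp [show ¬ a < b by omega]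

theorem pv_pyRange_pos_cons (a b s : Int) (hs : 0 < s) (h : a < b) :
    PySem.List.pyRange a b s = a :: PySem.List.pyRange (a + s) b s := by
  rw [PySem.List.pyRange_of_pos a b hs, PySem.List.pyRange_of_pos (a+s) b hs]
  have hcount : ((b - a + s - 1) / s).toNat
      = (if a + s < b then ((b - (a + s) + s - 1) / s).toNat else 0) + 1 := by
    by_cases h2 : a + s < b
    · rw [if_pos h2]
      have : b - a + s - 1 = (b - (a + s) + s - 1) + 1 * s := by ring
      rw [this, Int.add_mul_ediv_right _ _ (by omega : s ≠ 0)]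
      have hnn : 0 ≤ (b - (a + s) + s - 1) / s := Int.ediv_nonneg (by omega) (by omega)
      omega
    · rw [if_neg h2]
      have : b - a + s - 1 = (b - a - 1) + 1 * s := by ring
      rw [this, Int.add_mul_ediv_right _ _ (by omega : s ≠ 0)]
      have : (b - a - 1) / s = 0 := Int.ediv_eq_zero_of_lt (by omega) (by omega)
      omega
  rw [if_pos h, hcount, List.range_succ_eq_map]
  simp only [List.map_cons, List.map_map]
  congr 1
  · ring
  · apply List.map_congr_left
    intro k _
    simp only [Function.comp_apply, Nat.succ_eq_add_one]
    push_cast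
    ring

theorem pv_join_empty_flatten (l : List (List Char)) :
    PySem.Chars.join [] l = l.flatten := by
  induction l with
  | nil => simp [PySem.Chars.join_nil]
  | cons x xs ih =>
    cases xs with
    | nil => simp [PySem.Chars.join_singleton]
    | cons y ys => simp [PySem.Chars.join_cons_cons] at ih ⊢; simpa using ih

theorem pv_strJoin_empty_append (l1 l2 : List String) :
    PySem.Str.join "" (l1 ++ l2) = PySem.Str.join "" l1 ++ PySem.Str.join "" l2 := by
  apply String.toList_inj.mp
  simp [PySem.Str.toList_join, pv_join_empty_flatten]

theorem pv_strJoin_cons (sep : String) (x : String) (rest : List String) :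
    PySem.Str.join sep (x :: rest) = x ++ (if rest = [] then "" else sep ++ PySem.Str.join sep rest) := by
  apply String.toList_inj.mp
  cases rest with
  | nil => simp [PySem.Str.toList_join, PySem.Chars.join_singleton]
  | cons y ys =>
    simp [PySem.Str.toList_join, PySem.Chars.join_cons_cons]

theorem pv_strJoin_empty_sep (pre x : String) (xs : List String) :
    PySem.Str.join "" ((pre ++ x) :: xs.map (", " ++ ·)) = pre ++ PySem.Str.join ", " (x :: xs) := by
  induction xs generalizing pre x with
  | nil => simp [pv_strJoin_cons]
  | cons y ys ih =>
    rw [pv_strJoin_cons, pv_strJoin_cons ", "]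
    simp only [List.map_cons, reduceCtorEq, if_false]
    rw [show ((", " ++ y) :: List.map (fun a => ", " ++ a) ys) = ((", " ++ y) :: ys.map (", " ++ ·)) from rfl]
    rw [ih ", " y]
    have : ("" : String) ++ (", " ++ PySem.Str.join ", " (y :: ys)) = ", " ++ PySem.Str.join ", " (y :: ys) := by
      apply String.toList_inj.mp; simp
    rw [this, String.append_assoc]

-- A's mapped range of slices is exactly the chunk lines
theorem pv_mapA (items : List String) (ind : String) (wp : Nat) :
    ∀ (d j : Nat), items.length - j ≤ d →
    (PySem.List.pyRange (j : Int) (items.length : Int) ((wp : Int) + 1)).map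
        (fun idx => ind ++ PySem.Str.join ", " (PySem.List.slice items (some idx) (some (idx + ((wp : Int) + 1)))))
      = (pvChunks wp (items.drop j)).map (fun c => ind ++ PySem.Str.join ", " c) := by
  intro d
  induction d with
  | zero =>
    intro j hj
    rw [pv_pyRange_pos_nil _ _ _ (by positivity) (by exact_mod_cast by omega)]
    rw [List.drop_eq_nil_of_le (by omega)]
    rw [pvChunks]
    simp
  | succ d ih =>
    intro j hj
    by_cases hjl : items.length ≤ j
    · rw [pv_pyRange_pos_nil _ _ _ (by positivity) (by exact_mod_cast hjl)]
      rw [List.drop_eq_nil_of_le hjl]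
      rw [pvChunks]
      simp
    · have hjl' : j < items.length := by omega
      rw [pv_pyRange_pos_cons _ _ _ (by positivity) (by exact_mod_cast hjl')]
      rw [List.map_cons]
      have hsl : PySem.List.slice items (some (j : Int)) (some ((j : Int) + ((wp : Int) + 1)))
          = (items.drop j).take (wp + 1) := by
        have := PySem.List.slice_natCast_add items j (wp + 1)
        push_cast at this
        exact this
      have hrec : (j : Int) + ((wp : Int) + 1) = ((j + (wp + 1) : Nat) : Int) := by push_cast; ring
      rw [hsl, hrec, ih (j + (wp + 1)) (by omega)]
      have hne : items.drop j ≠ [] := by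
        simp [List.drop_eq_nil_iff]; omega
      conv_rhs => rw [pvChunks, dif_neg hne]
      rw [List.map_cons, List.drop_drop]

-- inside a chunk (index neither 0 nor a multiple of wrap) B's separator is ", "
theorem pv_mapB_mid (ind : String) (w : Int) :
    ∀ (cs : List String) (s : Int),
    (∀ i : Nat, i < cs.length → (s + i ≠ 0 ∧ PySem.Int.mod (s + (i : Int)) w ≠ 0)) →
    (PySem.List.enumerate cs s).map
        (fun p => (if p.1 == 0 then ind
                   else if PySem.Int.mod p.1 w == 0 then ",\n" ++ ind
                   else ", ") ++ p.2)
      = cs.map (", " ++ ·) := by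
  intro cs
  induction cs with
  | nil => intro s _; simp [PySem.List.enumerate]
  | cons x xs ih =>
    intro s h
    rw [PySem.List.enumerate_cons, List.map_cons, List.map_cons]
    have h0 := h 0 (by simp)
    simp only [Int.natCast_zero, add_zero] at h0
    rw [if_neg (by simpa using h0.1), if_neg (by simpa using h0.2)]
    rw [ih (s + 1) (fun i hi => by
      have := h (i + 1) (by simpa using Nat.succ_lt_succ hi)
      push_cast at this ⊢
      constructor
      · have := this.1; omega
      · have := this.2; convert this using 2; ring)]

-- B's enumerate pass produces the chunk normal form (prefixed with ",\n" for a non-first chunk)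
theorem pv_mapB (ind : String) (wp : Nat) :
    ∀ (d : Nat) (items : List String) (k : Nat), items ≠ [] → items.length ≤ d →
    PySem.Str.join "" ((PySem.List.enumerate items ((k : Int) * ((wp : Int) + 1))).map
        (fun p => (if p.1 == 0 then ind
                   else if PySem.Int.mod p.1 ((wp : Int) + 1) == 0 then ",\n" ++ ind
                   else ", ") ++ p.2))
      = (if k = 0 then pvT ind wp items else ",\n" ++ pvT ind wp items) := by
  intro d
  induction d with
  | zero =>
    intro items k hne hlen
    exact absurd (List.length_eq_zero_iff.mp (by omega)) hne
  | succ d ih =>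
    intro items k hne hlen
    set w : Int := (wp : Int) + 1 with hw
    obtain ⟨x, cs, hc⟩ : ∃ x cs, items.take (wp + 1) = x :: cs := by
      cases hi : items with
      | nil => exact absurd hi hne
      | cons a t => exact ⟨a, (t.take wp), by simp [hi]⟩
    have hcslen : cs.length ≤ wp := by
      have : (items.take (wp + 1)).length ≤ wp + 1 := by simp
      rw [hc] at this; simpa using this
    conv_lhs => rw [← List.take_append_drop (wp + 1) items, PySem.List.enumerate_append, List.map_append, pv_strJoin_empty_append]
    rw [hc, PySem.List.enumerate_cons, List.map_cons]
    have hkpos : 0 < w := by rw [hw]; positivity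
    have hksep : (if ((k : Int) * w == 0) = true then ind
        else if (PySem.Int.mod ((k : Int) * w) w == 0) = true then ",\n" ++ ind else ", ")
        = (if k = 0 then ind else ",\n" ++ ind) := by
      by_cases hk : k = 0
      · simp [hk]
      · have hk' : 0 < (k : Int) := by exact_mod_cast Nat.pos_of_ne_zero hk
        have h1 : ¬ (((k : Int) * w == 0) = true) := by
          simp only [beq_iff_eq]
          exact (by positivity : (0:Int) < (k:Int) * w).ne'
        have h2 : ((PySem.Int.mod ((k : Int) * w) w == 0) = true) := by
          simp only [beq_iff_eq, PySem.Int.mod_eq_zero_iff_dvd]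
          exact ⟨k, by ring⟩
        rw [if_neg h1, if_pos h2, if_neg hk]
    have hmid : (PySem.List.enumerate cs ((k : Int) * w + 1)).map
        (fun p => (if p.1 == 0 then ind
                   else if PySem.Int.mod p.1 w == 0 then ",\n" ++ ind
                   else ", ") ++ p.2)
      = cs.map (", " ++ ·) := by
      apply pv_mapB_mid
      intro i hi
      have hiwp : (i : Int) + 1 < w := by
        rw [hw]; push_cast; omega
      constructor
      · have : (0:Int) ≤ (k : Int) * w := by positivity
        omega
      · intro hz
        rw [PySem.Int.mod_eq_zero_iff_dvd] at hz
        have hdvd : w ∣ (1 + (i : Int)) := by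
          calc w ∣ ((k : Int) * w + 1 + (i : Int)) - (k : Int) * w :=
                dvd_sub hz ⟨k, by ring⟩
            _ = 1 + (i : Int) := by ring
        have := Int.le_of_dvd (by omega) hdvd
        omega
    simp only [hmid]
    rw [hksep, pv_strJoin_empty_sep]
    by_cases hrest : items.drop (wp + 1) = []
    · -- this was the last chunk
      rw [hrest]
      have hjnil : PySem.Str.join "" (([] : List (Int × String)).map
          (fun p => (if p.1 == 0 then ind
                     else if PySem.Int.mod p.1 w == 0 then ",\n" ++ ind
                     else ", ") ++ p.2)) = "" := by
        apply String.toList_inj.mp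
        simp [PySem.Str.toList_join, PySem.Chars.join_nil]
      rw [show PySem.List.enumerate ([] : List String) ((k : Int) * w + ((x :: cs).length : Int)) = [] from rfl] at *
      rw [hjnil]
      have hT : pvT ind wp items = ind ++ PySem.Str.join ", " (x :: cs) := by
        rw [pvT, pvChunks, dif_neg hne, hc, hrest, pvChunks]
        simp only [dif_pos]
        rw [List.map_cons, List.map_nil, pv_strJoin_cons, if_pos rfl]
        apply String.toList_inj.mp
        simp
      rw [hT]
      by_cases hk : k = 0 <;> simp only [hk, ite_true, ite_false] <;>
        apply String.toList_inj.mp <;> simp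
    · -- more chunks follow
      have hlen1 : wp + 1 < items.length := by
        by_contra hcon
        exact hrest (List.drop_eq_nil_of_le (by omega))
      have hclen : (x :: cs).length = wp + 1 := by
        rw [← hc, List.length_take]
        omega
      have hstart : (k : Int) * w + ((x :: cs).length : Int) = (((k + 1 : Nat)) : Int) * w := by
        rw [hclen, hw]; push_cast; ring
      rw [hstart, ih (items.drop (wp + 1)) (k + 1) hrest (by simp only [List.length_drop]; omega)]
      rw [if_neg (Nat.succ_ne_zero k)]
      have hchne : pvChunks wp (items.drop (wp + 1)) ≠ [] := by
        rw [pvChunks, dif_neg hrest]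
        exact List.cons_ne_nil _ _
      have hT : pvT ind wp items
          = (ind ++ PySem.Str.join ", " (x :: cs)) ++ (",\n" ++ pvT ind wp (items.drop (wp + 1))) := by
        rw [pvT, pvChunks, dif_neg hne, hc, List.map_cons, pv_strJoin_cons,
          if_neg (by simpa using hchne)]
        rfl
      rw [hT]
      by_cases hk : k = 0 <;> simp only [hk, ite_true, ite_false] <;>
        apply String.toList_inj.mp <;> simp

-- ===== VERDICT (by name: the statement is the Claim_ definition above) =====
theorem format_elements_spec : Claim_equal_format_elements := by
  intro networks indent wrap _ hPre
  unfold Spec_format_elements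
  by_cases hnil : networks = []
  · subst hnil
    rfl
  · have hw : 0 < wrap := hPre.resolve_left hnil
    have hwrap : wrap = ((wrap.toNat - 1 : Nat) : Int) + 1 := by omega
    set wp : Nat := wrap.toNat - 1 with hwp
    rw [format_elements, format_elements_alt]
    simp only [if_neg hnil]
    rw [pv_foldl_push, pv_foldl_push]
    simp only [List.nil_append]
    have hene : PySem.List.enumerate networks 0 ≠ [] := by
      have : (PySem.List.enumerate networks 0).length = networks.length :=
        PySem.List.length_enumerate networks 0
      intro h
      rw [h] at this
      exact hnil (List.length_eq_zero_iff.mp (by simpa using this.symm))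
    rw [if_neg (by simpa using hene)]
    have hA := pv_mapA networks indent wp networks.length 0 (by omega)
    simp only [Nat.cast_zero, List.drop_zero] at hA
    rw [hwrap, hA]
    have hB := pv_mapB indent wp networks.length networks 0 hnil (le_refl _)
    simp only [Nat.cast_zero, zero_mul, if_pos rfl] at hB
    rw [hB]
    rfl
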